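-- pv_equiv track=rewrite | github.com/Farbfetzen/Advent_of_Code | 2020/day_24.py | part_2
-- ===== SOURCE A (Python) =====
-- DIRECTIONS = {
--     "e": (1, 0),
--     "se": (0, 1),
--     "sw": (-1, 1),
--     "w": (-1, 0),
--     "nw": (0, -1),
--     "ne": (1, -1)
-- }
--
-- def check_neighbors(position, old_state, new_state,
--                     neighbors_to_check_around=None):
--     x, y = position
--     n_neighbors = 0
--     for dx, dy in DIRECTIONS.values():
--         neighbor_position = (x + dx, y + dy)
--         n_neighbors += old_state.get(neighbor_position, 0)
--         if neighbors_to_check_around is not None: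
--             neighbors_to_check_around.add(neighbor_position)
--     value = old_state.get(position, 0)
--     if value and n_neighbors in (1, 2) or not value and n_neighbors == 2:
--         new_state[position] = True
--
-- def part_2(hexmap):
--     for _ in range(100):
--         new_hexmap = {}
--         neighbors_to_check_around = set()
--         for position in hexmap:
--             check_neighbors(position, hexmap, new_hexmap,
--                             neighbors_to_check_around)
--         # Check the neighbors of the active cells:
--         for position in neighbors_to_check_around:
--             check_neighbors(position, hexmap, new_hexmap)
--         hexmap = new_hexmap
--     return sum(hexmap.values())
-- ===== SOURCE B (Python) =====
-- def part_2(hexmap):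
--     dirs = ((1, 0), (0, 1), (-1, 1), (-1, 0), (0, -1), (1, -1))
--     # active tiles, bucketed by x-coordinate: {x: set of y}
--     active = {}
--     for (x, y), v in hexmap.items():
--         if v:
--             row = active.get(x, set())
--             row.add(y)
--             active[x] = row
--     for _ in range(100):
--         counts = {}
--         for x, ys in active.items():
--             for y in ys:
--                 for dx, dy in dirs:
--                     row = counts.get(x + dx, {})
--                     row[y + dy] = row.get(y + dy, 0) + 1
--                     counts[x + dx] = row
--         new_active = {}
--         for x, row in counts.items():
--             new_active[x] = {y for y, c in row.items()
--                              if c == 2 or (c == 1 and y in active.get(x, set()))}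
--         active = new_active
--     return sum(len(ys) for ys in active.values())
-- ===== Notes on version B (the rewrite author's own statement) =====
-- stated objective: faster
-- what changed: A rescans the 6-neighbourhood (6 dict lookups) for every stored tile and again for every member of a separately collected neighbour set (~36+ lookups per active tile per generation); B keeps only the set of active tiles and builds one neighbour-counter dict with 6 increments per active tile per generation, then applies the survive/birth rule to the counter's entries.
import Mathlib
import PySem

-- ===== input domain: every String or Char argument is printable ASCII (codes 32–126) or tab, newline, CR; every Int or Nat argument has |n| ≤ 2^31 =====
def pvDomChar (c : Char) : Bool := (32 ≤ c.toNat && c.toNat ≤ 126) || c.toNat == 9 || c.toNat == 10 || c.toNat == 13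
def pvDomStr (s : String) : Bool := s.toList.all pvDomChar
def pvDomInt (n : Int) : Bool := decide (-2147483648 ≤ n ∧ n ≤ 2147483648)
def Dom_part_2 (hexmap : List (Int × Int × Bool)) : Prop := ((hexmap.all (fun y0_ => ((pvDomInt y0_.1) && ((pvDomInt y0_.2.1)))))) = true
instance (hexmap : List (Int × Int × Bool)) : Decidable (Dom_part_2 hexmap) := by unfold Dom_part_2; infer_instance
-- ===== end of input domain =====

-- B replaces A's per-cell rescans (6 dict lookups for every tile and every collected neighbour)
-- by one neighbour-counter dict fed 6 increments per active tile; equivalence is about the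
-- returned count (A mutates only its own locals, no caller-visible side effects).

-- ===== PORT A =====

-- DIRECTIONS.values() of A, in dict order
def part2Dirs : List (Int × Int) := [(1, 0), (0, 1), (-1, 1), (-1, 0), (0, -1), (1, -1)]

-- check_neighbors: returns (new_state, neighbors_to_check_around) after the Python mutations
def part2CheckNeighbors (position : Int × Int) (oldState : PySem.Dict (Int × Int) Bool)
    (newState : PySem.Dict (Int × Int) Bool)
    (neighborsToCheckAround : Option (PySem.Set (Int × Int))) :
    PySem.Dict (Int × Int) Bool × Option (PySem.Set (Int × Int)) :=
  let st := part2Dirs.foldl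
    (fun (st : Int × Option (PySem.Set (Int × Int))) d =>
      let np := (position.1 + d.1, position.2 + d.2)
      (st.1 + (if oldState.getD np false then 1 else 0),
       match st.2 with
       | some s => some (PySem.Set.add s np)
       | none => none))
    ((0 : Int), neighborsToCheckAround)
  let value := oldState.getD position false
  if (value && (st.1 == 1 || st.1 == 2)) || (!value && st.1 == 2) then
    (newState.insert position true, st.2)
  else
    (newState, st.2)

-- one pass of A's `for _ in range(100)` body; the set is consumed only into the dict whose
-- value-sum is returned, so iterating it in insertion order is faithful for the result
def part2Step (hexmap : PySem.Dict (Int × Int) Bool) : PySem.Dict (Int × Int) Bool :=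
  let r := hexmap.keys.foldl
    (fun (acc : PySem.Dict (Int × Int) Bool × PySem.Set (Int × Int)) position =>
      let res := part2CheckNeighbors position hexmap acc.1 (some acc.2)
      (res.1, res.2.getD acc.2))
    (PySem.Dict.empty, PySem.Set.empty)
  r.2.foldl (fun newHexmap position => (part2CheckNeighbors position hexmap newHexmap none).1) r.1

def part_2 (hexmap : List (Int × Int × Bool)) : Int :=
  let d0 : PySem.Dict (Int × Int) Bool :=
    PySem.Dict.ofList (hexmap.map (fun e => ((e.1, e.2.1), e.2.2)))
  let final := (PySem.List.pyRange 0 100 1).foldl (fun h _ => part2Step h) d0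
  final.values.foldl (fun a v => a + (if v then 1 else 0)) 0

-- ===== PORT B =====

def part2AltDirs : List (Int × Int) := [(1, 0), (0, 1), (-1, 1), (-1, 0), (0, -1), (1, -1)]

-- one pass of B's loop body: neighbour counts bucketed by x-coordinate ({x: {y: count}}),
-- then the survive/birth rule per bucket; active tiles are kept as {x: set of y}.
-- Sets/dicts are iterated only into values that do not depend on iteration order.
def part2AltStep (active : PySem.Dict Int (PySem.Set Int)) : PySem.Dict Int (PySem.Set Int) :=
  let counts := active.items.foldl
    (fun (c : PySem.Dict Int (PySem.Dict Int Int)) r =>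
      r.2.foldl
        (fun (c : PySem.Dict Int (PySem.Dict Int Int)) y =>
          part2AltDirs.foldl
            (fun (c : PySem.Dict Int (PySem.Dict Int Int)) d =>
              let row := c.getD (r.1 + d.1) PySem.Dict.empty
              c.insert (r.1 + d.1) (row.insert (y + d.2) (row.getD (y + d.2) 0 + 1)))
            c)
        c)
    PySem.Dict.empty
  counts.items.foldl
    (fun (na : PySem.Dict Int (PySem.Set Int)) xr =>
      na.insert xr.1 (PySem.Set.ofList (xr.2.items.filterMap
        (fun yc =>
          if yc.2 == 2 || (yc.2 == 1 && PySem.Set.contains (active.getD xr.1 PySem.Set.empty) yc.1)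
          then some yc.1 else none))))
    PySem.Dict.empty

def part_2_alt (hexmap : List (Int × Int × Bool)) : Int :=
  let d : PySem.Dict (Int × Int) Bool :=
    PySem.Dict.ofList (hexmap.map (fun e => ((e.1, e.2.1), e.2.2)))
  let active0 : PySem.Dict Int (PySem.Set Int) := d.items.foldl
    (fun (a : PySem.Dict Int (PySem.Set Int)) pv =>
      if pv.2 then a.insert pv.1.1 (PySem.Set.add (a.getD pv.1.1 PySem.Set.empty) pv.1.2) else a)
    PySem.Dict.empty
  let final := (PySem.List.pyRange 0 100 1).foldl (fun a _ => part2AltStep a) active0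
  final.values.foldl (fun acc ys => acc + PySem.Set.len ys) 0

-- ===== PRECONDITION & SPEC =====
def Spec_part_2 (hexmap : List (Int × Int × Bool)) (out : Int) : Prop := out = part_2_alt hexmap
instance (hexmap : List (Int × Int × Bool)) (out : Int) : Decidable (Spec_part_2 hexmap out) := by unfold Spec_part_2; infer_instance

-- ===== CLAIM (what is proved, stated in full; the proofs are below) =====
def Claim_equal_part_2 : Prop := ∀ (hexmap : List (Int × Int × Bool)), Dom_part_2 hexmap → Spec_part_2 hexmap (part_2 hexmap)

-- ===== LEMMAS AND PROOFS =====

-- the 6 hex neighbours of p, in A's direction order (shapes mirror the ports' folds)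
def pvNbrs (p : Int × Int) : List (Int × Int) :=
  [(p.1 + 1, p.2 + 0), (p.1 + 0, p.2 + 1), (p.1 + -1, p.2 + 1),
   (p.1 + -1, p.2 + 0), (p.1 + 0, p.2 + -1), (p.1 + 1, p.2 + -1)]

-- A's n_neighbors for position p against old state d
def pvN (d : PySem.Dict (Int × Int) Bool) (p : Int × Int) : Int :=
  0 + (if d.getD (p.1 + 1, p.2 + 0) false then 1 else 0)
    + (if d.getD (p.1 + 0, p.2 + 1) false then 1 else 0)
    + (if d.getD (p.1 + -1, p.2 + 1) false then 1 else 0)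
    + (if d.getD (p.1 + -1, p.2 + 0) false then 1 else 0)
    + (if d.getD (p.1 + 0, p.2 + -1) false then 1 else 0)
    + (if d.getD (p.1 + 1, p.2 + -1) false then 1 else 0)

-- A's activation rule for position p against old state d
def pvRule (d : PySem.Dict (Int × Int) Bool) (p : Int × Int) : Bool :=
  (d.getD p false && (pvN d p == 1 || pvN d p == 2)) || (!(d.getD p false) && pvN d p == 2)

-- the body of A's first per-step loop (over the keys), and of the second (over the set)
def pvLoop1F (d : PySem.Dict (Int × Int) Bool) :
    PySem.Dict (Int × Int) Bool × PySem.Set (Int × Int) → (Int × Int) →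
    PySem.Dict (Int × Int) Bool × PySem.Set (Int × Int) :=
  fun acc position =>
    let res := part2CheckNeighbors position d acc.1 (some acc.2)
    (res.1, res.2.getD acc.2)

def pvLoop2F (d : PySem.Dict (Int × Int) Bool) :
    PySem.Dict (Int × Int) Bool → (Int × Int) → PySem.Dict (Int × Int) Bool :=
  fun newHexmap position => (part2CheckNeighbors position d newHexmap none).1

lemma pv_getD_true_iff (d : PySem.Dict (Int × Int) Bool) (p : Int × Int) :
    d.getD p false = true ↔ d.get? p = some true := by
  rw [PySem.Dict.getD_eq_get?_getD]
  cases h : d.get? p <;> simp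

lemma pv_mem_keys_of_getD (d : PySem.Dict (Int × Int) Bool) (p : Int × Int)
    (h : d.getD p false = true) : p ∈ d.keys := by
  rw [← PySem.Dict.contains_iff_mem_keys, PySem.Dict.contains_eq_isSome_get?]
  rw [pv_getD_true_iff] at h
  simp [h]

lemma pv_check_none (pos : Int × Int) (d new : PySem.Dict (Int × Int) Bool) :
    part2CheckNeighbors pos d new none
      = (if pvRule d pos then (new.insert pos true, none) else (new, none)) := rfl

lemma pv_check_some (pos : Int × Int) (d new : PySem.Dict (Int × Int) Bool)
    (s : PySem.Set (Int × Int)) :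
    part2CheckNeighbors pos d new (some s)
      = (if pvRule d pos then (new.insert pos true, some (PySem.Set.update s (pvNbrs pos)))
         else (new, some (PySem.Set.update s (pvNbrs pos)))) := rfl

lemma pv_loop1F_eq (d : PySem.Dict (Int × Int) Bool)
    (acc : PySem.Dict (Int × Int) Bool × PySem.Set (Int × Int)) (x : Int × Int) :
    pvLoop1F d acc x
      = ((if pvRule d x then acc.1.insert x true else acc.1),
         PySem.Set.update acc.2 (pvNbrs x)) := by
  simp only [pvLoop1F, pv_check_some]
  split <;> simp

lemma pv_loop2F_eq (d : PySem.Dict (Int × Int) Bool)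
    (nd : PySem.Dict (Int × Int) Bool) (x : Int × Int) :
    pvLoop2F d nd x = (if pvRule d x then nd.insert x true else nd) := by
  simp only [pvLoop2F, pv_check_none]
  split <;> simp

lemma pv_loop1_inv (d : PySem.Dict (Int × Int) Bool) (l : List (Int × Int)) :
    ∀ (nd : PySem.Dict (Int × Int) Bool) (s : PySem.Set (Int × Int)),
    nd.keys.Nodup → s.Nodup →
    (l.foldl (pvLoop1F d) (nd, s)).1.keys.Nodup ∧
    (l.foldl (pvLoop1F d) (nd, s)).2.Nodup ∧
    (∀ p, (l.foldl (pvLoop1F d) (nd, s)).1.getD p false = true ↔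
          (nd.getD p false = true ∨ (p ∈ l ∧ pvRule d p = true))) ∧
    (∀ p, p ∈ (l.foldl (pvLoop1F d) (nd, s)).2 ↔ (p ∈ s ∨ ∃ q ∈ l, p ∈ pvNbrs q)) := by
  induction l with
  | nil => intro nd s h1 h2; exact ⟨h1, h2, by simp, by simp⟩
  | cons x t ih =>
    intro nd s h1 h2
    rw [List.foldl_cons, pv_loop1F_eq]
    have hnd' : (if pvRule d x then nd.insert x true else nd).keys.Nodup := by
      split
      · exact PySem.Dict.nodup_keys_insert _ _ _ h1
      · exact h1
    have hs' : (PySem.Set.update s (pvNbrs x)).Nodup := PySem.Set.nodup_update _ _ h2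
    obtain ⟨k1, k2, k3, k4⟩ := ih _ _ hnd' hs'
    refine ⟨k1, k2, ?_, ?_⟩
    · intro p
      rw [k3 p]
      by_cases hr : pvRule d x = true
      · by_cases hp : p = x
        · subst hp; simp [hr]
        · simp [hr, PySem.Dict.getD_insert, hp]
      · by_cases hp : p = x
        · subst hp; simp [hr]
        · simp [hr, hp]
    · intro p
      rw [k4 p, PySem.Set.mem_update]
      simp only [List.mem_cons]
      constructor
      · rintro ((h | h) | ⟨q, hq, hpq⟩)
        · exact Or.inl h
        · exact Or.inr ⟨x, Or.inl rfl, h⟩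
        · exact Or.inr ⟨q, Or.inr hq, hpq⟩
      · rintro (h | ⟨q, (rfl | hq), hpq⟩)
        · exact Or.inl (Or.inl h)
        · exact Or.inl (Or.inr hpq)
        · exact Or.inr ⟨q, hq, hpq⟩

lemma pv_loop2_inv (d : PySem.Dict (Int × Int) Bool) (l : List (Int × Int)) :
    ∀ (nd : PySem.Dict (Int × Int) Bool), nd.keys.Nodup →
    (l.foldl (pvLoop2F d) nd).keys.Nodup ∧
    (∀ p, (l.foldl (pvLoop2F d) nd).getD p false = true ↔
          (nd.getD p false = true ∨ (p ∈ l ∧ pvRule d p = true))) := by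
  induction l with
  | nil => intro nd h1; exact ⟨h1, by simp⟩
  | cons x t ih =>
    intro nd h1
    rw [List.foldl_cons, pv_loop2F_eq]
    have hnd' : (if pvRule d x then nd.insert x true else nd).keys.Nodup := by
      split
      · exact PySem.Dict.nodup_keys_insert _ _ _ h1
      · exact h1
    obtain ⟨k1, k2⟩ := ih _ hnd'
    refine ⟨k1, ?_⟩
    intro p
    rw [k2 p]
    by_cases hr : pvRule d x = true
    · by_cases hp : p = x
      · subst hp; simp [hr]
      · simp [hr, PySem.Dict.getD_insert, hp]
    · by_cases hp : p = x
      · subst hp; simp [hr]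
      · simp [hr, hp]

lemma pv_rule_covered (d : PySem.Dict (Int × Int) Bool) (p : Int × Int)
    (h : pvRule d p = true) : p ∈ d.keys ∨ ∃ q ∈ d.keys, p ∈ pvNbrs q := by
  by_cases hv : d.getD p false = true
  · exact Or.inl (pv_mem_keys_of_getD d p hv)
  · have hn : pvN d p = 2 := by
      simp only [pvRule, Bool.or_eq_true, Bool.and_eq_true, beq_iff_eq,
        Bool.not_eq_true'] at h
      rcases h with ⟨h1, _⟩ | ⟨_, h2⟩
      · exact absurd h1 hv
      · exact h2
    by_cases h1 : d.getD (p.1 + 1, p.2 + 0) false = true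
    · exact Or.inr ⟨_, pv_mem_keys_of_getD d _ h1, by simp [pvNbrs, Prod.ext_iff]⟩
    by_cases h2 : d.getD (p.1 + 0, p.2 + 1) false = true
    · exact Or.inr ⟨_, pv_mem_keys_of_getD d _ h2, by simp [pvNbrs, Prod.ext_iff]⟩
    by_cases h3 : d.getD (p.1 + -1, p.2 + 1) false = true
    · exact Or.inr ⟨_, pv_mem_keys_of_getD d _ h3, by simp [pvNbrs, Prod.ext_iff]⟩
    by_cases h4 : d.getD (p.1 + -1, p.2 + 0) false = true
    · exact Or.inr ⟨_, pv_mem_keys_of_getD d _ h4, by simp [pvNbrs, Prod.ext_iff]⟩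
    by_cases h5 : d.getD (p.1 + 0, p.2 + -1) false = true
    · exact Or.inr ⟨_, pv_mem_keys_of_getD d _ h5, by simp [pvNbrs, Prod.ext_iff]⟩
    by_cases h6 : d.getD (p.1 + 1, p.2 + -1) false = true
    · exact Or.inr ⟨_, pv_mem_keys_of_getD d _ h6, by simp [pvNbrs, Prod.ext_iff]⟩
    exfalso
    simp only [pvN, Bool.not_eq_true] at hn h1 h2 h3 h4 h5 h6
    rw [h1, h2, h3, h4, h5, h6] at hn
    simp at hn

lemma pv_step_eq (d : PySem.Dict (Int × Int) Bool) :
    part2Step d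
      = (d.keys.foldl (pvLoop1F d) (PySem.Dict.empty, PySem.Set.empty)).2.foldl
          (pvLoop2F d)
          (d.keys.foldl (pvLoop1F d) (PySem.Dict.empty, PySem.Set.empty)).1 := rfl

lemma pv_step_keys_nodup (d : PySem.Dict (Int × Int) Bool) : (part2Step d).keys.Nodup := by
  rw [pv_step_eq]
  obtain ⟨k1, _, _, _⟩ := pv_loop1_inv d d.keys PySem.Dict.empty PySem.Set.empty
    (by simp) List.nodup_nil
  exact (pv_loop2_inv d _ _ k1).1

lemma pv_step_getD (d : PySem.Dict (Int × Int) Bool) (p : Int × Int) :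
    (part2Step d).getD p false = true ↔ pvRule d p = true := by
  rw [pv_step_eq]
  obtain ⟨k1, _, k3, k4⟩ := pv_loop1_inv d d.keys PySem.Dict.empty PySem.Set.empty
    (by simp) List.nodup_nil
  rw [(pv_loop2_inv d _ _ k1).2 p, k3 p, k4 p]
  simp only [PySem.Dict.getD_empty, Bool.false_eq_true, false_or]
  constructor
  · rintro (⟨_, h⟩ | ⟨_, h⟩) <;> exact h
  · intro h
    rcases pv_rule_covered d p h with hk | hk
    · exact Or.inl ⟨hk, h⟩
    · exact Or.inr ⟨Or.inr hk, h⟩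

-- ---------- B side ----------

lemma pv_count_nodup (s : List (Int × Int)) (hs : s.Nodup) (x : Int × Int) :
    s.count x = if x ∈ s then 1 else 0 := by
  by_cases h : x ∈ s
  · simp [h, List.count_eq_one_of_mem hs h]
  · simp [h, List.count_eq_zero_of_not_mem h]

lemma pv_count_flat (s : List (Int × Int)) (p : Int × Int) :
    (s.flatMap pvNbrs).count p
      = s.count (p.1 + -1, p.2 + 0) + s.count (p.1 + 0, p.2 + -1) + s.count (p.1 + 1, p.2 + -1)
        + s.count (p.1 + 1, p.2 + 0) + s.count (p.1 + 0, p.2 + 1) + s.count (p.1 + -1, p.2 + 1) := by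
  induction s with
  | nil => simp
  | cons q t ih =>
    rw [List.flatMap_cons, List.count_append, ih]
    simp only [List.count_cons, pvNbrs, List.count_nil, beq_iff_eq, Prod.ext_iff]
    have e1 : ((q.1 + 1 = p.1 ∧ q.2 + 0 = p.2)) ↔ (q.1 = p.1 + -1 ∧ q.2 = p.2 + 0) := by omega
    have e2 : ((q.1 + 0 = p.1 ∧ q.2 + 1 = p.2)) ↔ (q.1 = p.1 + 0 ∧ q.2 = p.2 + -1) := by omega
    have e3 : ((q.1 + -1 = p.1 ∧ q.2 + 1 = p.2)) ↔ (q.1 = p.1 + 1 ∧ q.2 = p.2 + -1) := by omega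
    have e4 : ((q.1 + -1 = p.1 ∧ q.2 + 0 = p.2)) ↔ (q.1 = p.1 + 1 ∧ q.2 = p.2 + 0) := by omega
    have e5 : ((q.1 + 0 = p.1 ∧ q.2 + -1 = p.2)) ↔ (q.1 = p.1 + 0 ∧ q.2 = p.2 + 1) := by omega
    have e6 : ((q.1 + 1 = p.1 ∧ q.2 + -1 = p.2)) ↔ (q.1 = p.1 + -1 ∧ q.2 = p.2 + 1) := by omega
    simp only [e1, e2, e3, e4, e5, e6]
    split_ifs <;> omega

-- a single counter bump, as Source B performs it: counts[x+dx][y+dy] += 1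
def pvBump (c : PySem.Dict Int (PySem.Dict Int Int)) (q : Int × Int) :
    PySem.Dict Int (PySem.Dict Int Int) :=
  let row := c.getD q.1 PySem.Dict.empty
  c.insert q.1 (row.insert q.2 (row.getD q.2 0 + 1))

-- the active tiles of a bucketed state, as a flat list of (x, y) pairs
def pvPairs (na : PySem.Dict Int (PySem.Set Int)) : List (Int × Int) :=
  na.items.flatMap (fun r => r.2.map (fun y => (r.1, y)))

-- membership of tile p in a bucketed state
def pvMemA (na : PySem.Dict Int (PySem.Set Int)) (p : Int × Int) : Prop :=
  p.2 ∈ na.getD p.1 PySem.Set.empty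

-- well-formedness of a bucketed state: distinct buckets, duplicate-free rows
def pvWF (na : PySem.Dict Int (PySem.Set Int)) : Prop :=
  na.keys.Nodup ∧ ∀ x, (na.getD x PySem.Set.empty).Nodup

lemma pv_alt_counts (active : PySem.Dict Int (PySem.Set Int)) :
    (active.items.foldl
      (fun (c : PySem.Dict Int (PySem.Dict Int Int)) r =>
        r.2.foldl
          (fun (c : PySem.Dict Int (PySem.Dict Int Int)) y =>
            part2AltDirs.foldl
              (fun (c : PySem.Dict Int (PySem.Dict Int Int)) d =>
                let row := c.getD (r.1 + d.1) PySem.Dict.empty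
                c.insert (r.1 + d.1) (row.insert (y + d.2) (row.getD (y + d.2) 0 + 1)))
              c)
          c)
      PySem.Dict.empty)
    = ((pvPairs active).flatMap pvNbrs).foldl pvBump PySem.Dict.empty := by
  conv_rhs => rw [List.foldl_flatMap]
  conv_rhs => rw [pvPairs, List.foldl_flatMap]
  simp only [List.foldl_map]
  rfl

lemma pv_bump_inv (F : List (Int × Int)) :
    ∀ (c : PySem.Dict Int (PySem.Dict Int Int)),
    (∀ x, (c.getD x PySem.Dict.empty).keys.Nodup) →
    (∀ x y, ((F.foldl pvBump c).getD x PySem.Dict.empty).getD y 0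
        = (c.getD x PySem.Dict.empty).getD y 0 + (F.count (x, y) : Int))
    ∧ (∀ x, ((F.foldl pvBump c).getD x PySem.Dict.empty).keys.Nodup)
    ∧ (∀ x y, y ∈ ((F.foldl pvBump c).getD x PySem.Dict.empty).keys
        ↔ y ∈ (c.getD x PySem.Dict.empty).keys ∨ (x, y) ∈ F) := by
  induction F with
  | nil => intro c hc; refine ⟨by simp, hc, by simp⟩
  | cons q t ih =>
    intro c hc
    obtain ⟨a, b⟩ := q
    have hc' : ∀ x, ((pvBump c (a, b)).getD x PySem.Dict.empty).keys.Nodup := by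
      intro x
      by_cases hx : x = a
      · subst hx
        simp only [pvBump]
        rw [PySem.Dict.getD_insert, if_pos rfl]
        exact PySem.Dict.nodup_keys_insert _ _ _ (hc x)
      · simp only [pvBump]
        rw [PySem.Dict.getD_insert, if_neg hx]
        exact hc x
    obtain ⟨i1, i2, i3⟩ := ih (pvBump c (a, b)) hc'
    rw [List.foldl_cons]
    refine ⟨?_, i2, ?_⟩
    · intro x y
      rw [i1 x y]
      have hq : ((pvBump c (a, b)).getD x PySem.Dict.empty).getD y 0
          = (c.getD x PySem.Dict.empty).getD y 0 + (if (a, b) = (x, y) then 1 else 0) := by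
        by_cases hx : x = a
        · subst hx
          simp only [pvBump]
          rw [PySem.Dict.getD_insert, if_pos rfl, PySem.Dict.getD_insert]
          by_cases hy : y = b
          · subst hy; simp
          · simp [hy, Prod.ext_iff, Ne.symm hy]
        · simp only [pvBump]
          rw [PySem.Dict.getD_insert, if_neg hx]
          have hne : ¬((a, b) = (x, y)) := fun h => hx (congrArg Prod.fst h).symm
          rw [if_neg hne]
          omega
      rw [hq, List.count_cons]
      simp only [beq_iff_eq]
      by_cases hqe : (a, b) = (x, y)
      · simp [hqe]
        omega
      · simp [hqe]
    · intro x y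
      rw [i3 x y]
      have hq : (y ∈ ((pvBump c (a, b)).getD x PySem.Dict.empty).keys)
          ↔ (y ∈ (c.getD x PySem.Dict.empty).keys ∨ (x, y) = (a, b)) := by
        by_cases hx : x = a
        · subst hx
          simp only [pvBump]
          rw [PySem.Dict.getD_insert, if_pos rfl]
          rw [PySem.Dict.mem_keys_insert]
          simp [Prod.ext_iff]
          tauto
        · simp only [pvBump]
          rw [PySem.Dict.getD_insert, if_neg hx]
          have hne : ¬((x, y) = (a, b)) := fun h => hx (congrArg Prod.fst h)
          simp [hne]
      rw [hq]
      simp only [List.mem_cons]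
      tauto

lemma pv_counts_keys_mem (F : List (Int × Int)) (x : Int) :
    x ∈ (F.foldl pvBump PySem.Dict.empty).keys ↔ x ∈ F.map Prod.fst := by
  have he : F.foldl pvBump PySem.Dict.empty
      = F.foldl (fun (c : PySem.Dict Int (PySem.Dict Int Int)) q =>
          c.insert q.1 ((c.getD q.1 PySem.Dict.empty).insert q.2
            ((c.getD q.1 PySem.Dict.empty).getD q.2 0 + 1))) PySem.Dict.empty := rfl
  rw [he, PySem.Dict.keys_foldl_insert_key]
  simp [PySem.Set.mem_update]

lemma pv_counts_keys_nodup (F : List (Int × Int)) :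
    (F.foldl pvBump PySem.Dict.empty).keys.Nodup := by
  have he : F.foldl pvBump PySem.Dict.empty
      = F.foldl (fun (c : PySem.Dict Int (PySem.Dict Int Int)) q =>
          c.insert q.1 ((c.getD q.1 PySem.Dict.empty).insert q.2
            ((c.getD q.1 PySem.Dict.empty).getD q.2 0 + 1))) PySem.Dict.empty := rfl
  rw [he]
  exact PySem.Dict.nodup_keys_foldl_insert_key _ _ _ _ (by simp)

lemma pv_na_skip (g : Int × PySem.Dict Int Int → PySem.Set Int)
    (t : List (Int × PySem.Dict Int Int)) (x : Int) (hx : x ∉ t.map Prod.fst) :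
    ∀ (a : PySem.Dict Int (PySem.Set Int)),
    (t.foldl (fun na r => na.insert r.1 (g r)) a).getD x PySem.Set.empty
      = a.getD x PySem.Set.empty := by
  induction t with
  | nil => intro a; rfl
  | cons r t ih =>
    intro a
    simp only [List.map_cons, List.mem_cons, not_or] at hx
    rw [List.foldl_cons, ih hx.2, PySem.Dict.getD_insert, if_neg hx.1]

lemma pv_na_getD (g : Int × PySem.Dict Int Int → PySem.Set Int) :
    ∀ (l : List (Int × PySem.Dict Int Int)), (l.map Prod.fst).Nodup →
    ∀ (a : PySem.Dict Int (PySem.Set Int)) (x : Int),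
    (l.foldl (fun na r => na.insert r.1 (g r)) a).getD x PySem.Set.empty
      = (match l.find? (fun r => r.1 == x) with
         | some r => g r
         | none => a.getD x PySem.Set.empty) := by
  intro l
  induction l with
  | nil => intro _ a x; rfl
  | cons r t ih =>
    intro hl a x
    simp only [List.map_cons, List.nodup_cons] at hl
    rw [List.foldl_cons]
    by_cases hx : r.1 = x
    · rw [List.find?_cons_of_pos (by simp [hx])]
      rw [pv_na_skip g t x (hx ▸ hl.1)]
      show (a.insert r.1 (g r)).getD x PySem.Set.empty = g r
      rw [PySem.Dict.getD_insert, if_pos hx.symm]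
    · rw [List.find?_cons_of_neg (by simp [hx]), ih hl.2]
      rcases hfind : t.find? (fun r => r.1 == x) with _ | r'
      · simp only [hfind]
        show (a.insert r.1 (g r)).getD x PySem.Set.empty = a.getD x PySem.Set.empty
        rw [PySem.Dict.getD_insert, if_neg (fun h => hx h.symm)]
      · simp only [hfind]

-- membership in one produced bucket row
lemma pv_row_filter_mem (active : PySem.Dict Int (PySem.Set Int)) (x : Int)
    (row : PySem.Dict Int Int) (hrow : row.keys.Nodup) (y : Int) :
    y ∈ PySem.Set.ofList (row.items.filterMap
        (fun yc =>
          if yc.2 == 2 || (yc.2 == 1 && PySem.Set.contains (active.getD x PySem.Set.empty) yc.1)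
          then some yc.1 else none))
      ↔ y ∈ row.keys ∧ (row.getD y 0 = 2 ∨ (row.getD y 0 = 1 ∧ pvMemA active (x, y))) := by
  rw [PySem.Dict.items_eq_map_keys _ hrow 0]
  simp only [List.filterMap_map, PySem.Set.mem_ofList, List.mem_filterMap, Function.comp]
  constructor
  · rintro ⟨k, hk, hke⟩
    simp only [Option.ite_none_right_eq_some, Option.some.injEq] at hke
    obtain ⟨hcond, rfl⟩ := hke
    refine ⟨hk, ?_⟩
    simpa [pvMemA, PySem.Set.contains_iff] using hcond
  · rintro ⟨hy, hc⟩
    refine ⟨y, hy, ?_⟩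
    have hcond : (row.getD y 0 == 2
        || (row.getD y 0 == 1 && PySem.Set.contains (active.getD x PySem.Set.empty) y)) = true := by
      rcases hc with h | ⟨h, hm⟩
      · simp [h]
      · simp only [pvMemA] at hm
        simp [h]
        exact hm
    rw [if_pos hcond]

lemma pv_alt_mem (active : PySem.Dict Int (PySem.Set Int)) (p : Int × Int) :
    pvMemA (part2AltStep active) p ↔
      p ∈ (pvPairs active).flatMap pvNbrs ∧
        ((((pvPairs active).flatMap pvNbrs).count p : Int) = 2 ∨
         ((((pvPairs active).flatMap pvNbrs).count p : Int) = 1 ∧ pvMemA active p)) := by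
  obtain ⟨x, y⟩ := p
  have hF := pv_bump_inv ((pvPairs active).flatMap pvNbrs) PySem.Dict.empty (by simp)
  obtain ⟨i1, i2, i3⟩ := hF
  simp only [part2AltStep, pv_alt_counts, pvMemA]
  set C := ((pvPairs active).flatMap pvNbrs).foldl pvBump PySem.Dict.empty with hC
  have hkeysnd : (C.items.map Prod.fst).Nodup := pv_counts_keys_nodup _
  rw [pv_na_getD _ C.items hkeysnd]
  rcases hfind : C.items.find? (fun r => r.1 == x) with _ | r
  · simp only [hfind]
    have hnx : (x, y) ∉ (pvPairs active).flatMap pvNbrs := by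
      intro hmem
      have hx : x ∈ C.keys := by
        rw [hC, pv_counts_keys_mem]
        exact List.mem_map.mpr ⟨(x, y), hmem, rfl⟩
      rcases List.mem_map.mp hx with ⟨r, hr, hrx⟩
      have := List.find?_eq_none.mp hfind r hr
      simp [hrx] at this
    simp [PySem.Set.empty, hnx]
  · simp only [hfind]
    obtain ⟨rk, rrow⟩ := r
    have hrmem : (rk, rrow) ∈ C.items := List.mem_of_find?_eq_some hfind
    have hrx : rk = x := by simpa using List.find?_some hfind
    subst hrx
    have hrval : C.getD rk PySem.Dict.empty = rrow :=
      PySem.Dict.getD_of_mem_items C hrmem (pv_counts_keys_nodup _) _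
    rw [pv_row_filter_mem active rk rrow (by rw [← hrval]; exact i2 rk) y]
    rw [← hrval, i1 rk y, i3 rk y]
    simp only [PySem.Dict.getD_empty, PySem.Dict.keys_empty, List.not_mem_nil, false_or,
      zero_add]
    simp [pvMemA]

lemma pv_alt_wf (active : PySem.Dict Int (PySem.Set Int)) : pvWF (part2AltStep active) := by
  simp only [part2AltStep, pv_alt_counts]
  set C := ((pvPairs active).flatMap pvNbrs).foldl pvBump PySem.Dict.empty with hC
  have hkeysnd : (C.items.map Prod.fst).Nodup := pv_counts_keys_nodup _
  constructor
  · rw [PySem.Dict.keys_foldl_insert_key]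
    simp only [PySem.Dict.keys_empty]
    rw [PySem.Set.update_nil_left]
    exact PySem.Set.nodup_ofList _
  · intro x
    rw [pv_na_getD _ C.items hkeysnd]
    rcases hfind : C.items.find? (fun r => r.1 == x) with _ | r
    · simp only [hfind]
      exact List.nodup_nil
    · simp only [hfind]
      exact PySem.Set.nodup_ofList _

lemma pv_pairs_mem (na : PySem.Dict Int (PySem.Set Int)) (hk : na.keys.Nodup) (q : Int × Int) :
    q ∈ pvPairs na ↔ pvMemA na q := by
  simp only [pvPairs, List.mem_flatMap, List.mem_map, pvMemA]
  constructor
  · rintro ⟨⟨rk, rrow⟩, hr, y, hy, rfl⟩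
    have : na.getD rk PySem.Set.empty = rrow :=
      PySem.Dict.getD_of_mem_items na hr hk _
    rw [← this] at hy
    exact hy
  · intro h
    rw [PySem.Dict.getD_eq_get?_getD] at h
    rcases hget : na.get? q.1 with _ | row
    · rw [hget] at h
      simp [PySem.Set.empty] at h
    · rw [hget] at h
      simp only [Option.getD_some] at h
      exact ⟨(q.1, row), PySem.Dict.mem_items_of_get?_eq_some na hget, q.2, h, rfl⟩

lemma pv_pairs_nodup_aux (l : List (Int × PySem.Set Int)) (hk : (l.map Prod.fst).Nodup)
    (hr : ∀ r ∈ l, r.2.Nodup) :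
    (l.flatMap (fun r => r.2.map (fun y => (r.1, y)))).Nodup := by
  induction l with
  | nil => simp
  | cons r t ih =>
    simp only [List.map_cons, List.nodup_cons] at hk
    rw [List.flatMap_cons]
    refine List.Nodup.append ?_ (ih hk.2 (fun r hr' => hr r (List.mem_cons_of_mem _ hr'))) ?_
    · exact (hr r (List.mem_cons_self)).map (fun y z h => by simpa using h)
    · intro p hp hp'
      rcases List.mem_map.mp hp with ⟨y, _, rfl⟩
      rcases List.mem_flatMap.mp hp' with ⟨r', hr', hpr'⟩
      rcases List.mem_map.mp hpr' with ⟨y', _, heq⟩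
      have : r'.1 = r.1 := by
        have := congrArg Prod.fst heq
        simpa using this
      exact hk.1 (this ▸ List.mem_map.mpr ⟨r', hr', rfl⟩)

lemma pv_pairs_nodup (na : PySem.Dict Int (PySem.Set Int)) (h : pvWF na) :
    (pvPairs na).Nodup := by
  refine pv_pairs_nodup_aux na.items h.1 ?_
  rintro ⟨rk, rrow⟩ hr
  have : na.getD rk PySem.Set.empty = rrow :=
    PySem.Dict.getD_of_mem_items na hr h.1 _
  show rrow.Nodup
  rw [← this]
  exact h.2 rk

-- ---------- bridge ----------

lemma pv_flat_count_eq_pvN (d : PySem.Dict (Int × Int) Bool) (s : List (Int × Int))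
    (hs : s.Nodup) (hR : ∀ p, p ∈ s ↔ d.getD p false = true) (p : Int × Int) :
    ((s.flatMap pvNbrs).count p : Int) = pvN d p := by
  rw [pv_count_flat]
  push_cast
  rw [pv_count_nodup s hs, pv_count_nodup s hs, pv_count_nodup s hs,
    pv_count_nodup s hs, pv_count_nodup s hs, pv_count_nodup s hs]
  simp only [hR, pvN]
  split_ifs <;> omega

lemma pv_step_rel (d : PySem.Dict (Int × Int) Bool) (na : PySem.Dict Int (PySem.Set Int))
    (hwf : pvWF na) (hR : ∀ p, pvMemA na p ↔ d.getD p false = true) (p : Int × Int) :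
    pvMemA (part2AltStep na) p ↔ (part2Step d).getD p false = true := by
  rw [pv_step_getD, pv_alt_mem]
  have hs : (pvPairs na).Nodup := pv_pairs_nodup na hwf
  have hR' : ∀ q, q ∈ pvPairs na ↔ d.getD q false = true := by
    intro q
    rw [pv_pairs_mem na hwf.1 q]
    exact hR q
  have hc := pv_flat_count_eq_pvN d (pvPairs na) hs hR' p
  have hmem : p ∈ (pvPairs na).flatMap pvNbrs ↔
      0 < (((pvPairs na).flatMap pvNbrs).count p : Int) := by
    rw [← List.count_pos_iff]
    omega
  rw [hmem, hc, hR p]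
  simp only [pvRule, Bool.or_eq_true, Bool.and_eq_true, beq_iff_eq, Bool.not_eq_true']
  by_cases hv : d.getD p false = true <;> simp [hv] <;> omega

lemma pv_iter_rel (l : List Int) :
    ∀ (d : PySem.Dict (Int × Int) Bool) (na : PySem.Dict Int (PySem.Set Int)),
    d.keys.Nodup → pvWF na → (∀ p, pvMemA na p ↔ d.getD p false = true) →
    (l.foldl (fun h _ => part2Step h) d).keys.Nodup ∧
    pvWF (l.foldl (fun a _ => part2AltStep a) na) ∧
    (∀ p, pvMemA (l.foldl (fun a _ => part2AltStep a) na) p ↔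
          (l.foldl (fun h _ => part2Step h) d).getD p false = true) := by
  induction l with
  | nil => intro d na h1 h2 h3; exact ⟨h1, h2, h3⟩
  | cons x t ih =>
    intro d na h1 h2 h3
    rw [List.foldl_cons, List.foldl_cons]
    exact ih (part2Step d) (part2AltStep na) (pv_step_keys_nodup d) (pv_alt_wf na)
      (fun p => pv_step_rel d na h2 h3 p)

lemma pv_init_inv (l : List ((Int × Int) × Bool)) :
    ∀ (a : PySem.Dict Int (PySem.Set Int)), pvWF a →
    pvWF (l.foldl
      (fun (a : PySem.Dict Int (PySem.Set Int)) pv =>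
        if pv.2 then a.insert pv.1.1 (PySem.Set.add (a.getD pv.1.1 PySem.Set.empty) pv.1.2)
        else a) a) ∧
    (∀ q, pvMemA (l.foldl
      (fun (a : PySem.Dict Int (PySem.Set Int)) pv =>
        if pv.2 then a.insert pv.1.1 (PySem.Set.add (a.getD pv.1.1 PySem.Set.empty) pv.1.2)
        else a) a) q ↔ (pvMemA a q ∨ ∃ pv ∈ l, pv.2 = true ∧ pv.1 = q)) := by
  induction l with
  | nil => intro a ha; exact ⟨ha, by simp⟩
  | cons pv t ih =>
    intro a ha
    rw [List.foldl_cons]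
    rcases hv : pv.2 with _ | _
    · rw [if_neg Bool.false_ne_true]
      obtain ⟨w1, w2⟩ := ih a ha
      refine ⟨w1, fun q => ?_⟩
      rw [w2 q]
      simp [hv]
    · rw [if_pos rfl]
      have ha' : pvWF (a.insert pv.1.1 (PySem.Set.add (a.getD pv.1.1 PySem.Set.empty) pv.1.2)) := by
        constructor
        · exact PySem.Dict.nodup_keys_insert _ _ _ ha.1
        · intro x
          rw [PySem.Dict.getD_insert]
          by_cases hx : x = pv.1.1
          · rw [if_pos hx]
            exact PySem.Set.nodup_add _ _ (ha.2 _)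
          · rw [if_neg hx]
            exact ha.2 x
      obtain ⟨w1, w2⟩ := ih _ ha'
      refine ⟨w1, fun q => ?_⟩
      rw [w2 q]
      have hm : pvMemA (a.insert pv.1.1 (PySem.Set.add (a.getD pv.1.1 PySem.Set.empty) pv.1.2)) q
          ↔ (pvMemA a q ∨ q = pv.1) := by
        simp only [pvMemA]
        rw [PySem.Dict.getD_insert]
        by_cases hx : q.1 = pv.1.1
        · rw [if_pos hx]
          rw [PySem.Set.mem_add]
          constructor
          · rintro (h | h)
            · left; rw [hx]; exact h
            · right; exact Prod.ext hx h
          · rintro (h | rfl)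
            · left; rw [hx] at h; exact h
            · right; rfl
        · rw [if_neg hx]
          constructor
          · exact fun h => Or.inl h
          · rintro (h | rfl)
            · exact h
            · exact absurd rfl hx
      rw [hm]
      simp only [List.mem_cons]
      constructor
      · rintro ((h | h) | ⟨r, hr, h2, h3⟩)
        · exact Or.inl h
        · exact Or.inr ⟨pv, Or.inl rfl, hv, h.symm⟩
        · exact Or.inr ⟨r, Or.inr hr, h2, h3⟩
      · rintro (h | ⟨r, (rfl | hr), h2, h3⟩)
        · exact Or.inl (Or.inl h)
        · exact Or.inl (Or.inr h3.symm)
        · exact Or.inr ⟨r, hr, h2, h3⟩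

lemma pv_sum_bools (l : List Bool) : ∀ (a : Int),
    l.foldl (fun a v => a + (if v then 1 else 0)) a = a + ((l.filter id).length : Int) := by
  induction l with
  | nil => intro a; simp
  | cons v t ih =>
    intro a
    cases v
    · simp [ih]
    · simp [List.foldl_cons, ih]
      omega

lemma pv_count_final (d : PySem.Dict (Int × Int) Bool) (hnd : d.keys.Nodup)
    (s : List (Int × Int)) (hs : s.Nodup) (hR : ∀ p, p ∈ s ↔ d.getD p false = true) :
    d.values.foldl (fun a v => a + (if v then 1 else 0)) 0 = (s.length : Int) := by
  rw [pv_sum_bools, zero_add]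
  have hv : d.values = d.items.map (fun e => e.2) := rfl
  rw [hv, List.filter_map, Function.id_comp, List.length_map]
  have ht : ((d.items.filter (fun e => e.2)).map (fun e => e.1)).Nodup := by
    refine List.Nodup.sublist (List.Sublist.map _ List.filter_sublist) ?_
    exact hnd
  have hmem : ∀ p, p ∈ (d.items.filter (fun e => e.2)).map (fun e => e.1) ↔ p ∈ s := by
    intro p
    rw [hR p, pv_getD_true_iff, PySem.Dict.get?_eq_some_iff_mem_items _ _ _ hnd]
    simp only [List.mem_map, List.mem_filter]
    constructor
    · rintro ⟨⟨a, b⟩, ⟨hab, hb⟩, rfl⟩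
      simpa [show b = true from hb] using hab
    · intro h
      exact ⟨(p, true), ⟨h, rfl⟩, rfl⟩
  have hlen : (d.items.filter (fun e => e.2)).length = s.length := by
    calc (d.items.filter (fun e => e.2)).length
        = ((d.items.filter (fun e => e.2)).map (fun e => e.1)).length := by
          rw [List.length_map]
      _ = s.length := List.Perm.length_eq ((List.perm_ext_iff_of_nodup ht hs).mpr hmem)
  exact congrArg _ hlen

lemma pv_sum_rows (l : List (Int × PySem.Set Int)) : ∀ (a : Int),
    (l.map Prod.snd).foldl (fun acc ys => acc + PySem.Set.len ys) a
      = a + ((l.flatMap (fun r => r.2.map (fun y => (r.1, y)))).length : Int) := by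
  induction l with
  | nil => intro a; simp
  | cons r t ih =>
    intro a
    rw [List.map_cons, List.foldl_cons, ih, List.flatMap_cons, List.length_append,
      List.length_map]
    have : PySem.Set.len r.2 = (r.2.length : Int) := by
      simp [PySem.Set.len]
    rw [this]
    push_cast
    ring

-- ===== VERDICT (by name: the statement is the Claim_ definition above) =====
theorem part_2_spec : Claim_equal_part_2 := by
  intro hexmap _
  unfold Spec_part_2
  simp only [part_2, part_2_alt]
  set d0 : PySem.Dict (Int × Int) Bool :=
    PySem.Dict.ofList (hexmap.map (fun e => ((e.1, e.2.1), e.2.2))) with hd0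
  have hnd0 : d0.keys.Nodup := PySem.Dict.nodup_keys_ofList _
  obtain ⟨hwf0, hmem0⟩ := pv_init_inv d0.items PySem.Dict.empty
    ⟨by simp, fun x => by simp [PySem.Dict.getD_empty, PySem.Set.empty]⟩
  have hR0 : ∀ q, pvMemA (d0.items.foldl
      (fun (a : PySem.Dict Int (PySem.Set Int)) pv =>
        if pv.2 then a.insert pv.1.1 (PySem.Set.add (a.getD pv.1.1 PySem.Set.empty) pv.1.2)
        else a) PySem.Dict.empty) q ↔ d0.getD q false = true := by
    intro q
    rw [hmem0 q]
    have h1 : pvMemA (PySem.Dict.empty : PySem.Dict Int (PySem.Set Int)) q ↔ False := by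
      simp [pvMemA, PySem.Dict.getD_empty, PySem.Set.empty]
    rw [h1, false_or, pv_getD_true_iff, PySem.Dict.get?_eq_some_iff_mem_items _ _ _ hnd0]
    constructor
    · rintro ⟨⟨a, b⟩, hab, h2, h3⟩
      subst h3
      cases b
      · simp at h2
      · exact hab
    · intro h
      exact ⟨(q, true), h, rfl, rfl⟩
  obtain ⟨h1, h2, h3⟩ := pv_iter_rel (PySem.List.pyRange 0 100 1) d0 _ hnd0 hwf0 hR0
  rw [pv_count_final _ h1 (pvPairs _) (pv_pairs_nodup _ h2)
    (fun p => by rw [pv_pairs_mem _ h2.1 p]; exact h3 p)]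
  have hvals : ∀ (na : PySem.Dict Int (PySem.Set Int)), na.values = na.items.map Prod.snd :=
    fun _ => rfl
  rw [hvals, pv_sum_rows, zero_add, pvPairs]
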